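-- pv_equiv track=rewrite | github.com/T-Python-Sep-24/LAB_FUNCTIONS_101 | bonus.py | pyramid_pattern
-- ===== SOURCE A (Python) =====
-- def pyramid_pattern(variableMax :int ):
--     """
--     Draws a descending pyramid pattern starting from the specified number down to 1.
--
--     Parameters:
--     variableMax (int): The starting number for the pyramid.
--     Return:
--     str: A string representing the pyramid pattern, with each line showing numbers in descending order.
--
--     Thank you, Teacher Aqeel and Teacher Wjadan, for this simple puzzle!
--     """
--     values = ""
--     while variableMax > 0:
--         variableMin =variableMax
--         while variableMin > 0:
--             values+=str(variableMin)
--             variableMin -= 1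
--         values+='\n'
--         variableMax -= 1
--     return values
-- ===== SOURCE B (Python) =====
-- def pyramid_pattern(variableMax: int):
--     if variableMax <= 0:
--         return ""
--     lines = []
--     prev = ""
--     for k in range(1, variableMax + 1):
--         prev = str(k) + prev   # reuse previous line: no inner loop over digits
--         lines.append(prev)
--     out = ""
--     for line in reversed(lines):
--         out += line + "\n"
--     return out
-- ===== Notes on version B (the rewrite author's own statement) =====
-- stated objective: faster
-- what changed: B replaces A's nested while loops (which re-convert every number on every line) by building each line from the previous one (prepend str(k)) and joining the collected lines in reverse, so there is no inner loop over numbers.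
import Mathlib
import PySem

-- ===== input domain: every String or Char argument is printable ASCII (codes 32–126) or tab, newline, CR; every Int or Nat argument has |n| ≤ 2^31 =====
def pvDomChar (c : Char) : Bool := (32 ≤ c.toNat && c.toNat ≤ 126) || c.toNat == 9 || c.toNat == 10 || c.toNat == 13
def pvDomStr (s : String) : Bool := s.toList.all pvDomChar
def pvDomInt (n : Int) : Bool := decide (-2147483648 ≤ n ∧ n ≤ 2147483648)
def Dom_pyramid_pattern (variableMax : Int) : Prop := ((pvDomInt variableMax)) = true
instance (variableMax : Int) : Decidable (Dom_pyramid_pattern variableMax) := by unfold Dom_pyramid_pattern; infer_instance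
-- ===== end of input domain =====

-- B builds each line from the previous one (prepend str(k)) and joins the collected lines in reverse; A re-generates every digit with nested while loops.

-- ===== PORT A =====
-- inner while loop: values += str(variableMin); variableMin -= 1
def pyInnerA (variableMin : Int) (values : String) : String :=
  if variableMin > 0 then pyInnerA (variableMin - 1) (values ++ PySem.Int.toStr variableMin)
  else values
termination_by variableMin.toNat
decreasing_by omega

-- outer while loop: run inner loop from variableMax, then values += '\n'; variableMax -= 1
def pyOuterA (variableMax : Int) (values : String) : String :=
  if variableMax > 0 then pyOuterA (variableMax - 1) (pyInnerA variableMax values ++ "\n")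
  else values
termination_by variableMax.toNat
decreasing_by omega

def pyramid_pattern (variableMax : Int) : String := pyOuterA variableMax ""

-- ===== PORT B =====
def pyramid_pattern_alt (variableMax : Int) : String :=
  if variableMax ≤ 0 then ""
  else
    let st := (PySem.List.pyRange 1 (variableMax + 1) 1).foldl
      (fun (s : List String × String) k =>
        (s.1 ++ [PySem.Int.toStr k ++ s.2], PySem.Int.toStr k ++ s.2)) ([], "")
    st.1.reverse.foldl (fun out line => out ++ line ++ "\n") ""

-- ===== PRECONDITION & SPEC =====
def Spec_pyramid_pattern (variableMax : Int) (out : String) : Prop := out = pyramid_pattern_alt variableMax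
instance (variableMax : Int) (out : String) : Decidable (Spec_pyramid_pattern variableMax out) := by unfold Spec_pyramid_pattern; infer_instance

-- ===== CLAIM (what is proved, stated in full; the proofs are below) =====
def Claim_equal_pyramid_pattern : Prop := ∀ (variableMax : Int), Dom_pyramid_pattern variableMax → Spec_pyramid_pattern variableMax (pyramid_pattern variableMax)

-- ===== LEMMAS AND PROOFS =====

-- the k-th line: str(k) ++ str(k-1) ++ … ++ str(1)
def lineD : Nat → String
  | 0 => ""
  | n + 1 => PySem.Int.toStr ((n : Int) + 1) ++ lineD n

-- the pyramid from n down to 1, each line followed by '\n'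
def pyrP : Nat → String
  | 0 => ""
  | n + 1 => (lineD (n + 1) ++ "\n") ++ pyrP n

-- ascending list of lines [lineD 1, …, lineD n]
def linesL : Nat → List String
  | 0 => []
  | n + 1 => linesL n ++ [lineD (n + 1)]

theorem pyInnerA_eq (n : Nat) : ∀ acc, pyInnerA (n : Int) acc = acc ++ lineD n := by
  induction n with
  | zero => intro acc; rw [pyInnerA]; simp [lineD]
  | succ m ih =>
    intro acc
    rw [pyInnerA]
    have h : ((m : Int) + 1) > 0 := by positivity
    simp only [Int.natCast_succ, h, if_pos]
    rw [show ((m : Int) + 1 - 1) = (m : Int) by ring, ih, lineD]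
    rw [String.append_assoc]

theorem pyOuterA_eq (n : Nat) : ∀ acc, pyOuterA (n : Int) acc = acc ++ pyrP n := by
  induction n with
  | zero => intro acc; rw [pyOuterA]; simp [pyrP]
  | succ m ih =>
    intro acc
    rw [pyOuterA]
    have h : ((m : Int) + 1) > 0 := by positivity
    simp only [Int.natCast_succ, h, if_pos]
    have hin : pyInnerA ((m : Int) + 1) acc = acc ++ lineD (m + 1) := by
      have := pyInnerA_eq (m + 1) acc; push_cast at this; exact this
    rw [show ((m : Int) + 1 - 1) = (m : Int) by ring, ih, hin, pyrP]
    simp [String.append_assoc]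

theorem foldB_eq (n : Nat) :
    (PySem.List.pyRange 1 ((n : Int) + 1) 1).foldl
      (fun (s : List String × String) k =>
        (s.1 ++ [PySem.Int.toStr k ++ s.2], PySem.Int.toStr k ++ s.2)) ([], "")
      = (linesL n, lineD n) := by
  induction n with
  | zero => simp [PySem.List.pyRange_one_eq_nil, linesL, lineD]
  | succ m ih =>
    have h1 : (1 : Int) ≤ (m : Int) + 1 := by omega
    push_cast
    rw [PySem.List.pyRange_one_succ_right h1, List.foldl_append, ih]
    simp [linesL, lineD]

theorem joinB_eq (n : Nat) : ∀ acc,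
    (linesL n).reverse.foldl (fun out line => out ++ line ++ "\n") acc = acc ++ pyrP n := by
  induction n with
  | zero => intro acc; simp [linesL, pyrP]
  | succ m ih =>
    intro acc
    simp only [linesL, List.reverse_append, List.reverse_singleton, List.singleton_append,
      List.foldl_cons, ih, pyrP]
    simp [String.append_assoc]

-- ===== VERDICT (by name: the statement is the Claim_ definition above) =====
theorem pyramid_pattern_spec : Claim_equal_pyramid_pattern := by
  intro v _
  unfold Spec_pyramid_pattern pyramid_pattern pyramid_pattern_alt
  by_cases h : v ≤ 0
  · rw [if_pos h, pyOuterA]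
    simp [show ¬ v > 0 by omega]
  · rw [if_neg h]
    obtain ⟨n, rfl⟩ : ∃ n : Nat, v = (n : Int) := ⟨v.toNat, by omega⟩
    rw [pyOuterA_eq, foldB_eq, joinB_eq]
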